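-- pv_equiv track=rewrite | github.com/sjarmak/CodeContextBench_Dashboard | scripts/ccb_pipeline/sdlc_mapping.py | get_sdlc_phases
-- ===== SOURCE A (Python) =====
-- BENCHMARK_SDLC_MAP: dict[str, tuple[str, ...]] = {
--     "kubernetes-docs": ("Documentation",),
--     "ccb-kubernetes-docs": ("Documentation",),
--     "pytorch-issues": ("Implementation",),
--     "ccb-pytorch-issues": ("Implementation",),
--     "crossrepo": ("Implementation", "Maintenance"),
--     "ccb-crossrepo": ("Implementation", "Maintenance"),
--     "largerepo": ("Implementation",),
--     "ccb-largerepo": ("Implementation",),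
--     "swe-bench-pro": ("Implementation", "Testing"),
--     "swe-bench": ("Implementation", "Testing"),
--     "locobench": ("Implementation", "Code Review"),
--     "repoqa": ("Requirements",),
--     "di-bench": ("Maintenance",),
--     "swe-perf": ("Implementation", "Testing"),
--     "dependeval": ("Maintenance",),
--     "the-agent-company": ("Multiple",),
--     "tac": ("Multiple",),
--     "big_code_mcp": ("Implementation",),
--     "big-code": ("Implementation",),
--     "github_mined": ("Implementation",),
--     "tac_mcp_value": ("Multiple",),
-- }
--
-- def get_sdlc_phases(benchmark_name: str) -> list[str]:
--     """Map a benchmark name to its SDLC phases.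
--
--     Uses fuzzy matching: checks if any known benchmark pattern
--     is a substring of the provided benchmark name (case-insensitive).
--     Returns matches from longest pattern first to prefer more specific matches.
--
--     Args:
--         benchmark_name: The benchmark name to look up.
--
--     Returns:
--         List of SDLC phase strings. Returns ["Unknown"] if no match found.
--     """
--     if not benchmark_name:
--         return ["Unknown"]
--
--     name_lower = benchmark_name.lower().strip()
--
--     # Sort patterns by length descending so more specific patterns match first
--     sorted_patterns = sorted(BENCHMARK_SDLC_MAP.keys(), key=len, reverse=True)
--
--     for pattern in sorted_patterns:
--         if pattern in name_lower:
--             return list(BENCHMARK_SDLC_MAP[pattern])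
--
--     return ["Unknown"]
-- ===== SOURCE B (Python) =====
-- # Single pass, no sorting: keep the longest matching pattern (earliest wins ties);
-- # phases stored as small integer codes decoded through a phase-name table.
--
-- _PHASES = ["Documentation", "Implementation", "Maintenance", "Testing",
--            "Code Review", "Requirements", "Multiple"]
--
-- _PATTERNS = [
--     ("kubernetes-docs", [0]), ("ccb-kubernetes-docs", [0]),
--     ("pytorch-issues", [1]), ("ccb-pytorch-issues", [1]),
--     ("crossrepo", [1, 2]), ("ccb-crossrepo", [1, 2]),
--     ("largerepo", [1]), ("ccb-largerepo", [1]),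
--     ("swe-bench-pro", [1, 3]), ("swe-bench", [1, 3]),
--     ("locobench", [1, 4]), ("repoqa", [5]),
--     ("di-bench", [2]), ("swe-perf", [1, 3]),
--     ("dependeval", [2]), ("the-agent-company", [6]),
--     ("tac", [6]), ("big_code_mcp", [1]),
--     ("big-code", [1]), ("github_mined", [1]),
--     ("tac_mcp_value", [6]),
-- ]
--
--
-- def get_sdlc_phases(benchmark_name: str) -> list[str]:
--     if not benchmark_name:
--         return ["Unknown"]
--
--     s = benchmark_name.lower().strip()
--
--     best_len = -1
--     best_codes = None
--     for pat, codes in _PATTERNS: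
--         if len(pat) > best_len and pat in s:
--             best_len = len(pat)
--             best_codes = codes
--
--     if best_codes is None:
--         return ["Unknown"]
--     return [_PHASES[c] for c in best_codes]
-- ===== Notes on version B (the rewrite author's own statement) =====
-- stated objective: alternative
-- what changed: Replaces sort-patterns-by-length-then-return-first-substring-match with an unsorted single pass keeping the longest matching pattern (earliest wins ties), over a table that stores phases as integer codes decoded through a phase-name list.
import Mathlib
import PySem

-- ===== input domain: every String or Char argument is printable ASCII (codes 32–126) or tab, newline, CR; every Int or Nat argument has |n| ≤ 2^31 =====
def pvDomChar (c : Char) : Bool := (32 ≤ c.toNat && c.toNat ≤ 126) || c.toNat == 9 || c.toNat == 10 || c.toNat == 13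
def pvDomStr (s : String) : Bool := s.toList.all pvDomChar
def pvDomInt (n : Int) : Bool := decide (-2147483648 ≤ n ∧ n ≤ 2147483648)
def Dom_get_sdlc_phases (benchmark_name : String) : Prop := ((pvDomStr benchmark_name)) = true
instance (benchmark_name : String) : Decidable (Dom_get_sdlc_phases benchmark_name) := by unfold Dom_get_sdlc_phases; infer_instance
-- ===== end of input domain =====

-- B replaces A's per-call sort-then-first-match by one unsorted pass keeping the longest
-- (earliest on ties) matching pattern, with phases stored as integer codes (objective: alternative).

-- ===== PORT A =====
def BENCHMARK_SDLC_MAP : PySem.Dict String (List String) :=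
  PySem.Dict.ofList
    [ ("kubernetes-docs", ["Documentation"]), ("ccb-kubernetes-docs", ["Documentation"]),
      ("pytorch-issues", ["Implementation"]), ("ccb-pytorch-issues", ["Implementation"]),
      ("crossrepo", ["Implementation", "Maintenance"]), ("ccb-crossrepo", ["Implementation", "Maintenance"]),
      ("largerepo", ["Implementation"]), ("ccb-largerepo", ["Implementation"]),
      ("swe-bench-pro", ["Implementation", "Testing"]), ("swe-bench", ["Implementation", "Testing"]),
      ("locobench", ["Implementation", "Code Review"]), ("repoqa", ["Requirements"]),
      ("di-bench", ["Maintenance"]), ("swe-perf", ["Implementation", "Testing"]),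
      ("dependeval", ["Maintenance"]), ("the-agent-company", ["Multiple"]),
      ("tac", ["Multiple"]), ("big_code_mcp", ["Implementation"]),
      ("big-code", ["Implementation"]), ("github_mined", ["Implementation"]),
      ("tac_mcp_value", ["Multiple"]) ]

-- A's for-loop: return the phases of the first pattern contained in name_lower.
-- (the looked-up pattern comes from keys(), so Python's d[pattern] never raises; getD is exact here)
def aLoop (nl : String) : List String → List String
  | [] => ["Unknown"]
  | p :: rest =>
      if PySem.Str.isIn p nl then BENCHMARK_SDLC_MAP.getD p []
      else aLoop nl rest

def get_sdlc_phases (benchmark_name : String) : List String :=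
  if benchmark_name = "" then ["Unknown"]
  else
    aLoop (PySem.Str.strip (PySem.Str.lower benchmark_name))
      (PySem.List.sorted (PySem.Dict.keys BENCHMARK_SDLC_MAP) PySem.Str.len true)

-- ===== PORT B =====
def PHASE_NAMES : List String :=
  ["Documentation", "Implementation", "Maintenance", "Testing",
   "Code Review", "Requirements", "Multiple"]

def PATTERN_CODES : List (String × List Nat) :=
  [ ("kubernetes-docs", [0]), ("ccb-kubernetes-docs", [0]),
    ("pytorch-issues", [1]), ("ccb-pytorch-issues", [1]),
    ("crossrepo", [1, 2]), ("ccb-crossrepo", [1, 2]),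
    ("largerepo", [1]), ("ccb-largerepo", [1]),
    ("swe-bench-pro", [1, 3]), ("swe-bench", [1, 3]),
    ("locobench", [1, 4]), ("repoqa", [5]),
    ("di-bench", [2]), ("swe-perf", [1, 3]),
    ("dependeval", [2]), ("the-agent-company", [6]),
    ("tac", [6]), ("big_code_mcp", [1]),
    ("big-code", [1]), ("github_mined", [1]),
    ("tac_mcp_value", [6]) ]

-- _PHASES[c]: every code in PATTERN_CODES is < 7, so Python's indexing never raises;
-- the getD "" default is unreachable on this literal data.
def phaseName (c : Nat) : String := (PySem.List.pyGet? PHASE_NAMES (c : Int)).getD ""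

-- B's loop: best_len / best_codes accumulators, strict '>' so the earliest longest match is kept
def bFind (s : String) : List (String × List Nat) → Int → Option (List Nat) → Option (List Nat)
  | [], _, bestCodes => bestCodes
  | (pat, codes) :: rest, bestLen, bestCodes =>
      if bestLen < PySem.Str.len pat && PySem.Str.isIn pat s then
        bFind s rest (PySem.Str.len pat) (some codes)
      else bFind s rest bestLen bestCodes

def get_sdlc_phases_alt (benchmark_name : String) : List String :=
  if benchmark_name = "" then ["Unknown"]
  else
    let s := PySem.Str.strip (PySem.Str.lower benchmark_name)
    match bFind s PATTERN_CODES (-1) none with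
    | none => ["Unknown"]
    | some codes => codes.map phaseName

-- ===== PRECONDITION & SPEC =====
def Spec_get_sdlc_phases (benchmark_name : String) (out : List String) : Prop := out = get_sdlc_phases_alt benchmark_name
instance (benchmark_name : String) (out : List String) : Decidable (Spec_get_sdlc_phases benchmark_name out) := by unfold Spec_get_sdlc_phases; infer_instance

-- ===== CLAIM (what is proved, stated in full; the proofs are below) =====
def Claim_equal_get_sdlc_phases : Prop := ∀ (benchmark_name : String), Dom_get_sdlc_phases benchmark_name → Spec_get_sdlc_phases benchmark_name (get_sdlc_phases benchmark_name)

-- ===== LEMMAS AND PROOFS =====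

-- proof helper: A's first-match loop on (pattern, payload) pairs
def firstMatch {α : Type} (nl : String) (dflt : α) : List (String × α) → α
  | [] => dflt
  | e :: rest => if PySem.Str.isIn e.1 nl then e.2 else firstMatch nl dflt rest

theorem firstMatch_eq_find? {α : Type} (nl : String) (dflt : α) (L : List (String × α)) :
    firstMatch nl dflt L =
      (match L.find? (fun x => PySem.Str.isIn x.1 nl) with
       | some e => e.2
       | none => dflt) := by
  induction L with
  | nil => rfl
  | cons e rest ih =>
      by_cases h : PySem.Str.isIn e.1 nl = true
      · rw [List.find?_cons_of_pos (p := fun x : String × α => PySem.Str.isIn x.1 nl) h]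
        simp only [firstMatch, if_pos h]
      · rw [List.find?_cons_of_neg (p := fun x : String × α => PySem.Str.isIn x.1 nl) (by simpa using h)]
        simp only [firstMatch, if_neg h, ih]

-- proof helper: the strict-max single step (keeps the earliest longest matching pattern)
def mStep {α : Type} (nl : String) (best : Option (String × α)) (e : String × α) :
    Option (String × α) :=
  if PySem.Str.isIn e.1 nl &&
      (match best with
       | none => true
       | some b => decide (PySem.Str.len b.1 < PySem.Str.len e.1)) then
    some e
  else best

theorem mStep_false {α : Type} (nl : String) (e : String × α)
    (b : Option (String × α)) (hc : PySem.Str.isIn e.1 nl = false) :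
    mStep nl b e = b := by
  simp only [mStep, hc, Bool.false_and]
  rfl

theorem mStep_none {α : Type} (nl : String) (e : String × α)
    (hc : PySem.Str.isIn e.1 nl = true) : mStep nl none e = some e := by
  simp only [mStep, hc, Bool.true_and]
  rfl

theorem mStep_some_lt {α : Type} (nl : String) (e b : String × α)
    (hc : PySem.Str.isIn e.1 nl = true) (hl : PySem.Str.len b.1 < PySem.Str.len e.1) :
    mStep nl (some b) e = some e := by
  simp only [mStep, hc, Bool.true_and, decide_eq_true hl]
  rfl

theorem mStep_some_ge {α : Type} (nl : String) (e b : String × α)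
    (hl : PySem.Str.len e.1 ≤ PySem.Str.len b.1) :
    mStep nl (some b) e = some b := by
  simp only [mStep, decide_eq_false (not_lt.mpr hl), Bool.and_false]
  rfl

-- inserting e into a length-descending list commutes find? with one mStep step
theorem find?_insertBy {α : Type} (nl : String) (e : String × α)
    (S : List (String × α))
    (hS : S.Pairwise (fun a b => (fun x : String × α => PySem.Str.len x.1) b
                                   ≤ (fun x : String × α => PySem.Str.len x.1) a)) :
    (PySem.List.insertBy
        (fun a b => decide ((fun x : String × α => PySem.Str.len x.1) b
                             < (fun x : String × α => PySem.Str.len x.1) a)) e S).find?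
        (fun x => PySem.Str.isIn x.1 nl)
      = mStep nl (S.find? (fun x => PySem.Str.isIn x.1 nl)) e := by
  induction S with
  | nil =>
      by_cases hc : PySem.Str.isIn e.1 nl = true
      · rw [PySem.List.insertBy, List.find?_cons_of_pos (p := fun x : String × α => PySem.Str.isIn x.1 nl) hc, List.find?_nil (p := fun x : String × α => PySem.Str.isIn x.1 nl), mStep_none nl e hc]
      · rw [PySem.List.insertBy, List.find?_cons_of_neg (p := fun x : String × α => PySem.Str.isIn x.1 nl) (by simpa using hc), List.find?_nil (p := fun x : String × α => PySem.Str.isIn x.1 nl)]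
        exact (mStep_false nl e _ (by simpa using hc)).symm
  | cons y S' ih =>
      have hpair : ∀ z ∈ S', PySem.Str.len z.1 ≤ PySem.Str.len y.1 :=
        fun z hz => (List.pairwise_cons.mp hS).1 z hz
      have hS' := (List.pairwise_cons.mp hS).2
      by_cases hb : PySem.Str.len y.1 < PySem.Str.len e.1
      · -- e is inserted in front
        rw [PySem.List.insertBy, if_pos (decide_eq_true hb)]
        by_cases hc : PySem.Str.isIn e.1 nl = true
        · rw [List.find?_cons_of_pos (p := fun x : String × α => PySem.Str.isIn x.1 nl) hc]
          rcases hm : (y :: S').find? (fun x => PySem.Str.isIn x.1 nl) with _ | m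
          · rw [hm, mStep_none nl e hc]
          · have hmem : m ∈ y :: S' := List.mem_of_find?_eq_some hm
            have hlen : PySem.Str.len m.1 < PySem.Str.len e.1 := by
              rcases List.mem_cons.mp hmem with h | h
              · exact h ▸ hb
              · exact lt_of_le_of_lt (hpair m h) hb
            rw [hm, mStep_some_lt nl e m hc hlen]
        · rw [List.find?_cons_of_neg (p := fun x : String × α => PySem.Str.isIn x.1 nl) (by simpa using hc), mStep_false nl e _ (by simpa using hc)]
      · -- e goes after y
        rw [PySem.List.insertBy, if_neg (by simpa using hb)]
        by_cases hcy : PySem.Str.isIn y.1 nl = true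
        · rw [List.find?_cons_of_pos (p := fun x : String × α => PySem.Str.isIn x.1 nl) hcy, List.find?_cons_of_pos (p := fun x : String × α => PySem.Str.isIn x.1 nl) hcy,
            mStep_some_ge nl e y (not_lt.mp hb)]
        · rw [List.find?_cons_of_neg (p := fun x : String × α => PySem.Str.isIn x.1 nl) (by simpa using hcy),
            List.find?_cons_of_neg (p := fun x : String × α => PySem.Str.isIn x.1 nl) (by simpa using hcy), ih hS']

-- first match of the stable length-descending sort = the strict-max single pass
theorem sorted_find_eq_foldl {α : Type} (nl : String) (L : List (String × α)) :
    (PySem.List.sorted L (fun x => PySem.Str.len x.1) true).find?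
        (fun x => PySem.Str.isIn x.1 nl)
      = L.foldl (mStep nl) none := by
  induction L using List.reverseRecOn with
  | nil => rfl
  | append_singleton L e ih =>
      have h1 : PySem.List.sorted (L ++ [e]) (fun x => PySem.Str.len x.1) true
          = PySem.List.insertBy
              (fun a b => decide ((fun x : String × α => PySem.Str.len x.1) b
                                   < (fun x : String × α => PySem.Str.len x.1) a)) e
              (PySem.List.sorted L (fun x => PySem.Str.len x.1) true) := by
        rw [PySem.List.sorted_rev_eq_foldl_insertBy, PySem.List.sorted_rev_eq_foldl_insertBy,
          List.foldl_append]
        rfl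
      rw [h1,
        find?_insertBy nl e _ (PySem.List.sorted_pairwise_rev L (fun x => PySem.Str.len x.1)),
        ih, List.foldl_append]
      rfl

-- B's accumulator loop = foldl of mStep, projected to the payload
def lenOf {α : Type} : Option (String × α) → Int
  | none => -1
  | some b => PySem.Str.len b.1

theorem bFind_cons (nl pat : String) (codes : List Nat)
    (rest : List (String × List Nat)) (bestLen : Int) (bestCodes : Option (List Nat)) :
    bFind nl ((pat, codes) :: rest) bestLen bestCodes
      = if bestLen < PySem.Str.len pat && PySem.Str.isIn pat nl then
          bFind nl rest (PySem.Str.len pat) (some codes)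
        else bFind nl rest bestLen bestCodes := rfl

theorem len_nonneg (p : String) : (0 : Int) ≤ PySem.Str.len p := by
  simp [PySem.Str.len_eq]

theorem bFind_eq_foldl (nl : String) (L : List (String × List Nat))
    (b : Option (String × List Nat)) :
    bFind nl L (lenOf b) (b.map Prod.snd) = (L.foldl (mStep nl) b).map Prod.snd := by
  induction L generalizing b with
  | nil => rfl
  | cons e rest ih =>
      obtain ⟨pat, codes⟩ := e
      by_cases hc : PySem.Str.isIn pat nl = true
      · cases b with
        | none =>
            have hl : lenOf (none : Option (String × List Nat)) < PySem.Str.len pat :=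
              lt_of_lt_of_le (show (-1 : Int) < 0 by norm_num) (len_nonneg pat)
            rw [List.foldl_cons, bFind_cons, mStep_none nl (pat, codes) hc,
              if_pos (by simp only [Bool.and_eq_true, decide_eq_true_eq]; exact ⟨hl, hc⟩)]
            exact ih (some (pat, codes))
        | some y =>
            by_cases hl : PySem.Str.len y.1 < PySem.Str.len pat
            · have hl' : lenOf (some y) < PySem.Str.len pat := hl
              rw [List.foldl_cons, bFind_cons, mStep_some_lt nl (pat, codes) y hc hl,
                if_pos (by simp only [Bool.and_eq_true, decide_eq_true_eq]; exact ⟨hl', hc⟩)]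
              exact ih (some (pat, codes))
            · have hl' : ¬ lenOf (some y) < PySem.Str.len pat := hl
              rw [List.foldl_cons, bFind_cons, mStep_some_ge nl (pat, codes) y (not_lt.mp hl),
                if_neg (by simp only [Bool.and_eq_true, decide_eq_true_eq]
                           exact fun hT => hl' hT.1)]
              exact ih (some y)
      · have hc' : PySem.Str.isIn pat nl = false := by simpa using hc
        rw [List.foldl_cons, bFind_cons, mStep_false nl (pat, codes) b hc',
          if_neg (by simp only [Bool.and_eq_true, decide_eq_true_eq]
                     exact fun hT => by rw [hc'] at hT; exact absurd hT.2 (by simp))]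
        exact ih b

-- mStep only inspects the pattern, so mapping the payload commutes with one step …
theorem mStep_map (nl : String) (f : List Nat → List String)
    (b : Option (String × List Nat)) (p : String) (cs : List Nat) :
    mStep nl (b.map (Prod.map id f)) (p, f cs) = (mStep nl b (p, cs)).map (Prod.map id f) := by
  by_cases hc : PySem.Str.isIn p nl = true
  · cases b with
    | none =>
        rw [Option.map_none, mStep_none nl ((p, f cs) : String × List String) hc,
          mStep_none nl ((p, cs) : String × List Nat) hc, Option.map_some]
        rfl
    | some y =>
        obtain ⟨q, ds⟩ := y
        by_cases hl : PySem.Str.len q < PySem.Str.len p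
        · rw [Option.map_some,
            show Prod.map id f (q, ds) = ((q, f ds) : String × List String) from rfl,
            mStep_some_lt nl ((p, f cs) : String × List String) ((q, f ds)) hc hl,
            mStep_some_lt nl ((p, cs) : String × List Nat) ((q, ds)) hc hl, Option.map_some]
          rfl
        · rw [Option.map_some,
            show Prod.map id f (q, ds) = ((q, f ds) : String × List String) from rfl,
            mStep_some_ge nl ((p, f cs) : String × List String) ((q, f ds)) (not_lt.mp hl),
            mStep_some_ge nl ((p, cs) : String × List Nat) ((q, ds)) (not_lt.mp hl),
            Option.map_some]
          rfl
  · have hc' : PySem.Str.isIn p nl = false := by simpa using hc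
    rw [mStep_false nl (p, f cs) _ hc', mStep_false nl (p, cs) _ hc']

-- … and hence with the whole fold
theorem foldl_mStep_map (nl : String) (f : List Nat → List String)
    (L : List (String × List Nat)) (b : Option (String × List Nat)) :
    (L.foldl (mStep nl) b).map (Prod.map id f)
      = (L.map (Prod.map id f)).foldl (mStep nl) (b.map (Prod.map id f)) := by
  induction L generalizing b with
  | nil => rfl
  | cons e rest ih =>
      obtain ⟨p, cs⟩ := e
      rw [List.map_cons, List.foldl_cons, List.foldl_cons, ih,
        show Prod.map id f (p, cs) = ((p, f cs) : String × List String) from rfl, mStep_map]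

-- A's items, decoded from B's coded table (checked by evaluation on the literals)
theorem items_decode :
    PATTERN_CODES.map (Prod.map id (fun cs => cs.map phaseName))
      = PySem.Dict.items BENCHMARK_SDLC_MAP := by decide

-- A's loop over the sorted keys with dict lookup = firstMatch over the sorted (key, value) pairs
theorem h_aLoop (nl : String) :
    aLoop nl (PySem.List.sorted (PySem.Dict.keys BENCHMARK_SDLC_MAP) PySem.Str.len true)
    = firstMatch nl ["Unknown"]
        (PySem.List.sorted (PySem.Dict.items BENCHMARK_SDLC_MAP) (fun x => PySem.Str.len x.1) true) := by
  rfl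

-- ===== VERDICT (by name: the statement is the Claim_ definition above) =====
theorem get_sdlc_phases_spec : Claim_equal_get_sdlc_phases := by
  intro name _
  show get_sdlc_phases name = get_sdlc_phases_alt name
  unfold get_sdlc_phases get_sdlc_phases_alt
  by_cases h : name = ""
  · simp [h]
  · simp only [if_neg h]
    set nl := PySem.Str.strip (PySem.Str.lower name) with hnl
    have hmap := foldl_mStep_map nl (fun cs => cs.map phaseName) PATTERN_CODES none
    simp only [Option.map_none] at hmap
    rw [h_aLoop, firstMatch_eq_find?, sorted_find_eq_foldl, ← items_decode, ← hmap]
    have hb : bFind nl PATTERN_CODES (-1) none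
        = (PATTERN_CODES.foldl (mStep nl) none).map Prod.snd :=
      bFind_eq_foldl nl PATTERN_CODES none
    rw [hb]
    cases PATTERN_CODES.foldl (mStep nl) none with
    | none => rfl
    | some y => rfl
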